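-- pv_equiv track=rewrite | github.com/shobhitmishra/CodingProblems | LeetCode/Session3/bombermanGame.py | GetConfigAtThreeSeconds
-- ===== SOURCE A (Python) =====
-- def GetConfigAtThreeSeconds(grid):
--     result = [list('O' * len(grid[0])) for word in grid]
--     for i in range(0,len(grid)):
--         for j in range(0,len(grid[i])):
--            #if there is a bomb at i,j, detonate
--            if grid[i][j] == 'O':
--                 result[i][j] = '.'
--                 # detonate surrounding bombs as well
--                 if i > 0:
--                    result[i-1][j] = '.'
--                 if i < len(grid) - 1:
--                     result[i+1][j] = '.'
--                 if j > 0: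
--                     result[i][j-1] = '.'
--                 if j < len(grid[0]) - 1:
--                     result[i][j+1] = '.'
--     return result
-- ===== SOURCE B (Python) =====
-- def GetConfigAtThreeSeconds(grid):
--     n = len(grid)
--     w = len(grid[0]) if grid else 0
--
--     def bomb(i, j):
--         return 0 <= i < n and 0 <= j < len(grid[i]) and grid[i][j] == 'O'
--
--     return [['.' if (bomb(i, j) or bomb(i - 1, j) or bomb(i + 1, j)
--                      or bomb(i, j - 1) or bomb(i, j + 1)) else 'O'
--              for j in range(w)]
--             for i in range(n)]
-- ===== Notes on version B (the rewrite author's own statement) =====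
-- stated objective: simpler
-- what changed: Replaces A's scatter (prefill an all-'O' buffer, then each bomb writes '.' into itself and four neighbors) by a gather: each output cell is computed independently as '.' iff it or an in-bounds orthogonal neighbor holds a bomb, built by a nested comprehension with no mutable buffer.
import Mathlib
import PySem

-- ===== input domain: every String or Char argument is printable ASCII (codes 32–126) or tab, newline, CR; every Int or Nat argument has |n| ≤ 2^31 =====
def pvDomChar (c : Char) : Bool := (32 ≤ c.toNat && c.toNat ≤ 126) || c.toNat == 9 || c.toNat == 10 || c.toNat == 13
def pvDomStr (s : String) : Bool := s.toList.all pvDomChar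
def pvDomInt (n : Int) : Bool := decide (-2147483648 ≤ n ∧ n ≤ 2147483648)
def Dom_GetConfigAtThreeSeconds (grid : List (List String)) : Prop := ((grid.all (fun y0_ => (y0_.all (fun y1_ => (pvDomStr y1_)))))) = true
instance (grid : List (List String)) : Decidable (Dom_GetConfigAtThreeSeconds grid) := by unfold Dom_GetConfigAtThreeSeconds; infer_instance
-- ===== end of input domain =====

-- B recomputes each cell independently (gather: read the cell and its in-bounds neighbors)
-- instead of A's scatter of '.' writes into a prefilled mutable buffer; objective: simpler.


-- ===== PORT A =====
-- result[i][j] = v  (Python's `result[i][j] = v`; in-range on every admitted input)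
def pvSet2 (res : List (List String)) (i j : Nat) (v : String) : List (List String) :=
  res.set i ((res.getD i []).set j v)

-- the body of A's double loop for one (i, j): detonate the bomb at (i, j) if present
def pvStepA (grid : List (List String)) (w : Nat) (res : List (List String)) (i j : Nat) :
    List (List String) :=
  if (grid.getD i []).getD j "" = "O" then
    let r1 := pvSet2 res i j "."
    let r2 := if 0 < i then pvSet2 r1 (i - 1) j "." else r1
    let r3 := if i < grid.length - 1 then pvSet2 r2 (i + 1) j "." else r2
    let r4 := if 0 < j then pvSet2 r3 i (j - 1) "." else r3
    if j < w - 1 then pvSet2 r4 i (j + 1) "." else r4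
  else res

def GetConfigAtThreeSeconds (grid : List (List String)) : List (List String) :=
  let w := (grid.headD []).length
  let init := grid.map (fun _ => List.replicate w "O")
  (List.range grid.length).foldl (fun res i =>
    (List.range (grid.getD i []).length).foldl (fun res j => pvStepA grid w res i j) res) init

-- ===== PORT B =====
-- `bomb(i, j)` of Source B: Int indices, short-circuit bounds checks exactly as the Python
def pvBomb (grid : List (List String)) (i j : Int) : Bool :=
  decide (0 ≤ i) && decide (i < (grid.length : Int)) && decide (0 ≤ j) &&
  decide (j < ((grid.getD i.toNat []).length : Int)) &&
  ((grid.getD i.toNat []).getD j.toNat "" == "O")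

def GetConfigAtThreeSeconds_alt (grid : List (List String)) : List (List String) :=
  let n := grid.length
  let w := (grid.headD []).length
  (List.range n).map (fun (i : Nat) => (List.range w).map (fun (j : Nat) =>
    if pvBomb grid (i : Int) (j : Int) || pvBomb grid ((i : Int) - 1) (j : Int)
       || pvBomb grid ((i : Int) + 1) (j : Int) || pvBomb grid (i : Int) ((j : Int) - 1)
       || pvBomb grid (i : Int) ((j : Int) + 1)
    then "." else "O"))

-- ===== PRECONDITION & SPEC =====
-- Pre_ excludes exactly the inputs on which A raises IndexError: a ragged grid with a bomb
-- 'O' at a column index ≥ len(grid[0]) (A's write result[i][j] = '.' is then out of range).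
def Pre_GetConfigAtThreeSeconds (grid : List (List String)) : Prop :=
  ∀ a < grid.length, ∀ b < (grid.getD a []).length,
    (grid.getD a []).getD b "" = "O" → b < (grid.headD []).length
instance (grid : List (List String)) : Decidable (Pre_GetConfigAtThreeSeconds grid) := by
  unfold Pre_GetConfigAtThreeSeconds; infer_instance

def pvWitness_GetConfigAtThreeSeconds : List (List String) :=
  [["O", "."], [".", "x"]]

def Spec_GetConfigAtThreeSeconds (grid : List (List String)) (out : List (List String)) : Prop := out = GetConfigAtThreeSeconds_alt grid
instance (grid : List (List String)) (out : List (List String)) : Decidable (Spec_GetConfigAtThreeSeconds grid out) := by unfold Spec_GetConfigAtThreeSeconds; infer_instance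

-- ===== CLAIM (what is proved, stated in full; the proofs are below) =====
def Claim_equal_GetConfigAtThreeSeconds : Prop := ∀ (grid : List (List String)), Dom_GetConfigAtThreeSeconds grid → Pre_GetConfigAtThreeSeconds grid → Spec_GetConfigAtThreeSeconds grid (GetConfigAtThreeSeconds grid)

-- ===== LEMMAS AND PROOFS =====

-- read result[i][j] (with defaults; all reads below are in range)
def pvGet2 (res : List (List String)) (i j : Nat) : String :=
  (res.getD i []).getD j ""

-- res is an n × w rectangle
def pvShape (res : List (List String)) (n w : Nat) : Prop :=
  res.length = n ∧ ∀ i < n, (res.getD i []).length = w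

-- writer (a,b) puts '.' into cell (i,j) during A's pass
def pvHit (grid : List (List String)) (w a b i j : Nat) : Bool :=
  ((grid.getD a []).getD b "" == "O") &&
  ( (a == i && b == j)
  || (decide (0 < a) && (a - 1 == i) && (b == j))
  || (decide (a < grid.length - 1) && (a + 1 == i) && (b == j))
  || ((a == i) && decide (0 < b) && (b - 1 == j))
  || ((a == i) && decide (b < w - 1) && (b + 1 == j)) )


lemma pv_getD_set (l : List (List String)) (i j : Nat) (a : List String) :
    (l.set i a).getD j [] = if i = j ∧ i < l.length then a else l.getD j [] := by
  split_ifs with h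
  · obtain ⟨rfl, h2⟩ := h
    simp [List.getD_eq_getElem?_getD, h2]
  · rw [not_and_or] at h
    rcases h with h | h
    · simp [List.getD_eq_getElem?_getD, h]
    · rw [List.set_eq_of_length_le (by omega)]

lemma pv_getD_set_str (l : List String) (i j : Nat) (v : String) :
    (l.set i v).getD j "" = if i = j ∧ i < l.length then v else l.getD j "" := by
  split_ifs with h
  · obtain ⟨rfl, h2⟩ := h
    simp [List.getD_eq_getElem?_getD, h2]
  · rw [not_and_or] at h
    rcases h with h | h
    · simp [List.getD_eq_getElem?_getD, h]
    · rw [List.set_eq_of_length_le (by omega)]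

lemma shape_set2 {res : List (List String)} {n w : Nat} (h : pvShape res n w)
    (a b : Nat) (v : String) : pvShape (pvSet2 res a b v) n w := by
  obtain ⟨hl, hr⟩ := h
  constructor
  · simp [pvSet2, hl]
  · intro i hi
    rw [pvSet2, pv_getD_set]
    split_ifs with h'
    · obtain ⟨rfl, ha⟩ := h'
      rw [List.length_set]
      exact hr a hi
    · exact hr i hi

lemma get2_set2 (res : List (List String)) (a b i j : Nat) (v : String)
    (ha : a < res.length) (hb : b < (res.getD a []).length) :
    pvGet2 (pvSet2 res a b v) i j = if i = a ∧ j = b then v else pvGet2 res i j := by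
  simp only [pvGet2, pvSet2]
  rw [pv_getD_set]
  by_cases hia : a = i
  · subst hia
    rw [if_pos ⟨rfl, ha⟩, pv_getD_set_str]
    split_ifs with h1 h2 h3 <;> first | rfl | omega
  · rw [if_neg (fun h => hia h.1), if_neg (fun h => hia h.1.symm)]

lemma get2_condWrite (c : Prop) [Decidable c] (res : List (List String)) {n w : Nat}
    (hs : pvShape res n w) (p q i j : Nat) (hpq : c → p < n ∧ q < w) :
    pvGet2 (if c then pvSet2 res p q "." else res) i j
      = if c ∧ i = p ∧ j = q then "." else pvGet2 res i j := by
  split_ifs with hc h2 h3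
  · obtain ⟨hp, hq⟩ := hpq hc
    rw [get2_set2 res p q i j "." (hs.1 ▸ hp) (by rw [hs.2 p hp]; exact hq)]
    rw [if_pos h2.2]
  · obtain ⟨hp, hq⟩ := hpq hc
    rw [get2_set2 res p q i j "." (hs.1 ▸ hp) (by rw [hs.2 p hp]; exact hq)]
    rw [if_neg (by tauto)]
  · exact absurd h3.1 hc
  · rfl

lemma shape_step {grid res : List (List String)} {w : Nat} (h : pvShape res grid.length w)
    (a b : Nat) : pvShape (pvStepA grid w res a b) grid.length w := by
  simp only [pvStepA]
  split_ifs <;> (repeat apply shape_set2) <;> exact h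

lemma get2_step {grid res : List (List String)}
    (hPre : Pre_GetConfigAtThreeSeconds grid)
    (hs : pvShape res grid.length (grid.headD []).length)
    {a b : Nat} (ha : a < grid.length) (hb : b < (grid.getD a []).length) (i j : Nat) :
    pvGet2 (pvStepA grid (grid.headD []).length res a b) i j
      = if pvHit grid (grid.headD []).length a b i j then "." else pvGet2 res i j := by
  by_cases hO : (grid.getD a []).getD b "" = "O"
  · have hbw : b < (grid.headD []).length := hPre a ha b hb hO
    have s1 : pvShape (pvSet2 res a b ".") grid.length (grid.headD []).length :=
      shape_set2 hs a b "."
    have s2 : pvShape (if 0 < a then pvSet2 (pvSet2 res a b ".") (a - 1) b "." else pvSet2 res a b ".") grid.length (grid.headD []).length := by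
      split_ifs <;> (repeat apply shape_set2) <;> exact hs
    have s3 : pvShape (if a < grid.length - 1 then pvSet2 (if 0 < a then pvSet2 (pvSet2 res a b ".") (a - 1) b "." else pvSet2 res a b ".") (a + 1) b "." else (if 0 < a then pvSet2 (pvSet2 res a b ".") (a - 1) b "." else pvSet2 res a b ".")) grid.length (grid.headD []).length := by
      split_ifs <;> (repeat apply shape_set2) <;> exact hs
    have s4 : pvShape (if 0 < b then pvSet2 (if a < grid.length - 1 then pvSet2 (if 0 < a then pvSet2 (pvSet2 res a b ".") (a - 1) b "." else pvSet2 res a b ".") (a + 1) b "." else (if 0 < a then pvSet2 (pvSet2 res a b ".") (a - 1) b "." else pvSet2 res a b ".")) a (b - 1) "." else (if a < grid.length - 1 then pvSet2 (if 0 < a then pvSet2 (pvSet2 res a b ".") (a - 1) b "." else pvSet2 res a b ".") (a + 1) b "." else (if 0 < a then pvSet2 (pvSet2 res a b ".") (a - 1) b "." else pvSet2 res a b "."))) grid.length (grid.headD []).length := by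
      split_ifs <;> (repeat apply shape_set2) <;> exact hs
    simp only [pvStepA, if_pos hO]
    rw [get2_condWrite (b < (grid.headD []).length - 1) _ s4 a (b + 1) i j
      (fun hc => ⟨ha, by omega⟩)]
    rw [get2_condWrite (0 < b) _ s3 a (b - 1) i j (fun hc => ⟨ha, by omega⟩)]
    rw [get2_condWrite (a < grid.length - 1) _ s2 (a + 1) b i j (fun hc => ⟨by omega, hbw⟩)]
    rw [get2_condWrite (0 < a) _ s1 (a - 1) b i j (fun hc => ⟨by omega, hbw⟩)]
    rw [get2_set2 res a b i j "." (hs.1 ▸ ha) (by rw [hs.2 a ha]; exact hbw)]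
    simp only [pvHit, hO, beq_self_eq_true, Bool.true_and, Bool.or_eq_true,
      Bool.and_eq_true, beq_iff_eq, decide_eq_true_eq]
    split_ifs <;> first | rfl | omega
  · simp only [pvStepA, if_neg hO, pvHit]
    rw [if_neg]
    simp only [Bool.and_eq_true, beq_iff_eq]
    tauto

lemma shape_inner {grid res : List (List String)} {w : Nat} (h : pvShape res grid.length w)
    (a : Nat) (l : List Nat) :
    pvShape (l.foldl (fun r b => pvStepA grid w r a b) res) grid.length w := by
  induction l generalizing res with
  | nil => exact h
  | cons x xs ih => exact ih (shape_step h a x)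

lemma shape_outer {grid res : List (List String)} {w : Nat} (h : pvShape res grid.length w)
    (l : List Nat) :
    pvShape (l.foldl (fun r a =>
      (List.range (grid.getD a []).length).foldl (fun r b => pvStepA grid w r a b) r) res)
      grid.length w := by
  induction l generalizing res with
  | nil => exact h
  | cons x xs ih => exact ih (shape_inner h x _)

lemma get2_inner {grid res : List (List String)}
    (hPre : Pre_GetConfigAtThreeSeconds grid)
    (hs : pvShape res grid.length (grid.headD []).length)
    {a : Nat} (ha : a < grid.length) {m : Nat} (hm : m ≤ (grid.getD a []).length) (i j : Nat) :
    pvGet2 ((List.range m).foldl (fun r b => pvStepA grid (grid.headD []).length r a b) res) i j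
      = if (List.range m).any (fun b => pvHit grid (grid.headD []).length a b i j) then "."
        else pvGet2 res i j := by
  induction m with
  | zero => simp
  | succ m ih =>
    rw [List.range_succ, List.foldl_append, List.any_append]
    simp only [List.foldl_cons, List.foldl_nil, List.any_cons, List.any_nil, Bool.or_false]
    rw [get2_step hPre (shape_inner hs a _) ha (by omega)]
    rw [ih (by omega)]
    rcases Bool.eq_false_or_eq_true (pvHit grid (grid.headD []).length a m i j) with h1 | h1 <;>
      rcases Bool.eq_false_or_eq_true ((List.range m).any
        (fun b => pvHit grid (grid.headD []).length a b i j)) with h2 | h2 <;>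
      rw [h1, h2] <;> simp

lemma get2_outer {grid res : List (List String)}
    (hPre : Pre_GetConfigAtThreeSeconds grid)
    (hs : pvShape res grid.length (grid.headD []).length)
    {m : Nat} (hm : m ≤ grid.length) (i j : Nat) :
    pvGet2 ((List.range m).foldl (fun r a =>
        (List.range (grid.getD a []).length).foldl
          (fun r b => pvStepA grid (grid.headD []).length r a b) r) res) i j
      = if (List.range m).any (fun a =>
            (List.range (grid.getD a []).length).any
              (fun b => pvHit grid (grid.headD []).length a b i j)) then "."
        else pvGet2 res i j := by
  induction m with
  | zero => simp
  | succ m ih =>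
    rw [List.range_succ, List.foldl_append, List.any_append]
    simp only [List.foldl_cons, List.foldl_nil, List.any_cons, List.any_nil, Bool.or_false]
    rw [get2_inner hPre (shape_outer hs _) (by omega) (le_refl _) i j]
    rw [ih (by omega)]
    rcases Bool.eq_false_or_eq_true ((List.range (grid.getD m []).length).any
        (fun b => pvHit grid (grid.headD []).length m b i j)) with h1 | h1 <;>
      rcases Bool.eq_false_or_eq_true ((List.range m).any
        (fun a => (List.range (grid.getD a []).length).any
          (fun b => pvHit grid (grid.headD []).length a b i j))) with h2 | h2 <;>
      rw [h1, h2] <;> simp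


lemma bomb_cast (grid : List (List String)) (i j : Nat) :
    pvBomb grid (i : Int) (j : Int)
      = (decide (i < grid.length) && decide (j < (grid.getD i []).length)
         && ((grid.getD i []).getD j "" == "O")) := by
  simp [pvBomb]

lemma bomb_im (grid : List (List String)) (i j : Nat) :
    pvBomb grid ((i : Int) - 1) (j : Int)
      = (decide (0 < i) && decide (i - 1 < grid.length)
         && decide (j < (grid.getD (i - 1) []).length)
         && ((grid.getD (i - 1) []).getD j "" == "O")) := by
  cases i with
  | zero => simp [pvBomb]
  | succ k =>
    have h : ((k + 1 : Nat) : Int) - 1 = ((k : Nat) : Int) := by push_cast; ring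
    rw [h, bomb_cast]
    simp

lemma bomb_ip (grid : List (List String)) (i j : Nat) :
    pvBomb grid ((i : Int) + 1) (j : Int)
      = (decide (i + 1 < grid.length) && decide (j < (grid.getD (i + 1) []).length)
         && ((grid.getD (i + 1) []).getD j "" == "O")) := by
  have h : ((i : Int) + 1) = ((i + 1 : Nat) : Int) := by push_cast; ring
  rw [h, bomb_cast]

lemma bomb_jm (grid : List (List String)) (i j : Nat) :
    pvBomb grid (i : Int) ((j : Int) - 1)
      = (decide (0 < j) && decide (i < grid.length)
         && decide (j - 1 < (grid.getD i []).length)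
         && ((grid.getD i []).getD (j - 1) "" == "O")) := by
  cases j with
  | zero => simp [pvBomb]
  | succ k =>
    have h : ((k + 1 : Nat) : Int) - 1 = ((k : Nat) : Int) := by push_cast; ring
    rw [h, bomb_cast]
    simp

lemma bomb_jp (grid : List (List String)) (i j : Nat) :
    pvBomb grid (i : Int) ((j : Int) + 1)
      = (decide (i < grid.length) && decide (j + 1 < (grid.getD i []).length)
         && ((grid.getD i []).getD (j + 1) "" == "O")) := by
  have h : ((j : Int) + 1) = ((j + 1 : Nat) : Int) := by push_cast; ring
  rw [h, bomb_cast]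

-- the gather condition of B, at Nat level
lemma hit_iff_bomb {grid : List (List String)} {i j : Nat}
    (hi : i < grid.length) (hj : j < (grid.headD []).length) :
    ((List.range grid.length).any (fun a =>
        (List.range (grid.getD a []).length).any
          (fun b => pvHit grid (grid.headD []).length a b i j)))
      = (pvBomb grid (i : Int) (j : Int) || pvBomb grid ((i : Int) - 1) (j : Int)
         || pvBomb grid ((i : Int) + 1) (j : Int) || pvBomb grid (i : Int) ((j : Int) - 1)
         || pvBomb grid (i : Int) ((j : Int) + 1)) := by
  rw [bomb_cast, bomb_im, bomb_ip, bomb_jm, bomb_jp, Bool.eq_iff_iff]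
  simp only [List.any_eq_true, List.mem_range, pvHit, Bool.or_eq_true, Bool.and_eq_true,
    beq_iff_eq, decide_eq_true_eq]
  constructor
  · rintro ⟨a, ha, b, hb, hO,
      ((((⟨h1, h2⟩ | ⟨⟨h1, h2⟩, h3⟩) | ⟨⟨h1, h2⟩, h3⟩) | ⟨⟨h1, h2⟩, h3⟩) | ⟨⟨h1, h2⟩, h3⟩)⟩
    · subst h1; subst h2; tauto
    · obtain rfl : b = j := h3
      obtain rfl : a = i + 1 := by omega
      have h4 : 0 < i + 1 := Nat.succ_pos i
      simp only [Nat.add_sub_cancel] at *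
      tauto
    · obtain rfl : b = j := h3
      obtain rfl : a + 1 = i := h2
      have h4 : 0 < a + 1 := Nat.succ_pos a
      simp only [Nat.add_sub_cancel] at *
      tauto
    · obtain rfl : a = i := h1
      obtain rfl : b = j + 1 := by omega
      have h4 : 0 < j + 1 := Nat.succ_pos j
      simp only [Nat.add_sub_cancel] at *
      tauto
    · obtain rfl : a = i := h1
      obtain rfl : b + 1 = j := h3
      have h4 : 0 < b + 1 := Nat.succ_pos b
      simp only [Nat.add_sub_cancel] at *
      tauto
  · rintro ((((⟨⟨h1, h2⟩, h3⟩ | ⟨⟨⟨h1, h2⟩, h3⟩, h4⟩) | ⟨⟨h1, h2⟩, h3⟩) | ⟨⟨⟨h1, h2⟩, h3⟩, h4⟩) |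
      ⟨⟨h1, h2⟩, h3⟩)
    · exact ⟨i, h1, j, h2, h3, by tauto⟩
    · refine ⟨i - 1, h2, j, h3, h4, ?_⟩
      exact Or.inl (Or.inl (Or.inr ⟨⟨by omega, by omega⟩, rfl⟩))
    · refine ⟨i + 1, h1, j, h2, h3, ?_⟩
      exact Or.inl (Or.inl (Or.inl (Or.inr ⟨⟨by omega, by omega⟩, rfl⟩)))
    · refine ⟨i, hi, j - 1, h3, h4, ?_⟩
      exact Or.inr ⟨⟨rfl, by omega⟩, by omega⟩
    · refine ⟨i, hi, j + 1, h2, h3, ?_⟩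
      exact Or.inl (Or.inr ⟨⟨rfl, by omega⟩, by omega⟩)

lemma shape_init (grid : List (List String)) :
    pvShape (grid.map (fun _ => List.replicate (grid.headD []).length "O"))
      grid.length (grid.headD []).length := by
  constructor
  · simp
  · intro i hi
    rw [List.getD_eq_getElem?_getD, List.getElem?_map]
    simp [List.getElem?_eq_getElem hi]

lemma get2_init (grid : List (List String)) {i : Nat} (hi : i < grid.length) (j : Nat) :
    pvGet2 (grid.map (fun _ => List.replicate (grid.headD []).length "O")) i j
      = if j < (grid.headD []).length then "O" else "" := by
  have h1 : (grid.map (fun _ => List.replicate (grid.headD []).length "O")).getD i []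
      = List.replicate (grid.headD []).length "O" := by
    rw [List.getD_eq_getElem (hn := by simpa using hi)]
    simp
  simp only [pvGet2, h1]
  rw [List.getD_eq_getElem?_getD, List.getElem?_replicate]
  split_ifs <;> simp

-- ===== VERDICT (by name: the statement is the Claim_ definition above) =====
theorem GetConfigAtThreeSeconds_spec : Claim_equal_GetConfigAtThreeSeconds := by
  intro grid _ hPre
  unfold Spec_GetConfigAtThreeSeconds
  have hshape : pvShape (GetConfigAtThreeSeconds grid) grid.length (grid.headD []).length := by
    simp only [GetConfigAtThreeSeconds]
    exact shape_outer (shape_init grid) _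
  have hBlen : (GetConfigAtThreeSeconds_alt grid).length = grid.length := by
    simp [GetConfigAtThreeSeconds_alt]
  apply List.ext_getElem (by rw [hshape.1, hBlen])
  intro i hA1 hB1
  have hi : i < grid.length := hshape.1 ▸ hA1
  have hrowlen : ((GetConfigAtThreeSeconds grid)[i]).length = (grid.headD []).length := by
    have h := hshape.2 i hi
    rwa [List.getD_eq_getElem _ _ hA1] at h
  apply List.ext_getElem
  · rw [hrowlen]
    simp [GetConfigAtThreeSeconds_alt]
  · intro j hj1 hj2
    have hjw : j < (grid.headD []).length := hrowlen ▸ hj1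
    have hA : (GetConfigAtThreeSeconds grid)[i][j]
        = pvGet2 (GetConfigAtThreeSeconds grid) i j := by
      rw [pvGet2, List.getD_eq_getElem _ _ hA1, List.getD_eq_getElem _ _ hj1]
    rw [hA]
    simp only [GetConfigAtThreeSeconds]
    rw [get2_outer hPre (shape_init grid) (le_refl _) i j]
    rw [get2_init grid hi j, if_pos hjw, hit_iff_bomb hi hjw]
    simp only [GetConfigAtThreeSeconds_alt, List.getElem_map, List.getElem_range]
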